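-- pv_equiv track=rewrite | github.com/StateLibraryVictoria/bagit-workflow | src/helper_functions.py | guess_primary_id
-- ===== SOURCE A (Python) =====
-- def guess_primary_id(
--     identifiers: list, identifier_prefixes: list = ["RA", "PA", "SC", "POL", "H", "MS"]
-- ) -> str:
--     """Supply a list of identifiers and an ordered list of prefixes and the algorithm will return the first one that matches.
--     Use a better algorithm if you can.
--     """
--     if identifiers == None:
--         return None
--     # if there is only one, return it
--     if type(identifiers) == str:
--         return identifiers
--     # sort the identifiers for quicker processing
--     identifiers.sort()
--     # iterate through until one matches
--     for prefix in identifier_prefixes: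
--         # creates a list containing only identifiers that start with the prefix.
--         result = list(filter(lambda x: x.startswith(prefix), identifiers))
--         # returns the first result
--         if len(result) > 0:
--             return result[0]
--     return None
-- ===== SOURCE B (Python) =====
-- def guess_primary_id(
--     identifiers: list, identifier_prefixes: list = ["RA", "PA", "SC", "POL", "H", "MS"]
-- ) -> str:
--     """Single pass over the sorted identifiers: each id gets the index of the
--     first prefix it starts with as its priority, and we keep the first id seen
--     with the smallest priority (the list is sorted, so that is the smallest id)."""
--     if identifiers == None:
--         return None
--     if type(identifiers) == str:
--         return identifiers
--     identifiers.sort()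
--     best = None  # (priority, identifier)
--     for x in identifiers:
--         for i, p in enumerate(identifier_prefixes):
--             if x.startswith(p):
--                 if best is None or i < best[0]:
--                     best = (i, x)
--                 break
--     return None if best is None else best[1]
-- ===== Notes on version B (the rewrite author's own statement) =====
-- stated objective: alternative
-- what changed: Instead of filtering the whole identifier list once per prefix, B makes one pass over the sorted identifiers, assigns each id the index of the first prefix it starts with, and keeps the first id with the smallest such index.
import Mathlib
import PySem

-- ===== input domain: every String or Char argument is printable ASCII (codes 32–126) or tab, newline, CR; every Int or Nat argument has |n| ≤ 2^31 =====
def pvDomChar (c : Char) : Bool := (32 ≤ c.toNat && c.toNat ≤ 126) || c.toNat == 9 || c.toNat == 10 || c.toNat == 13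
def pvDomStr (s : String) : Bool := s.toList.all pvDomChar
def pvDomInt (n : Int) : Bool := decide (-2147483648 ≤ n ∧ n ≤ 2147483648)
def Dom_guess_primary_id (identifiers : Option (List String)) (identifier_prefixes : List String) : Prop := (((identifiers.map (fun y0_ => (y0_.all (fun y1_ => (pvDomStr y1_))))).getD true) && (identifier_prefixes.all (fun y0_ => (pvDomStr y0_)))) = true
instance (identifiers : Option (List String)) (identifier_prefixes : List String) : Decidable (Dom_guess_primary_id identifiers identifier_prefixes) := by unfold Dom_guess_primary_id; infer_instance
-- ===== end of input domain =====

-- B replaces the per-prefix filter passes by one pass over the sorted identifiers keeping the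
-- first id with the smallest matching-prefix index (objective: alternative decomposition).
-- A sorts `identifiers` in place; B performs the same mutation; the equivalence proved is
-- about the return value. A's `type(identifiers) == str` guard can never fire under the
-- declared type (identifiers : Option (List String)) and is therefore not represented.

-- ===== PORT A =====
-- the `for prefix in identifier_prefixes: result = filter(...); if len(result) > 0: return result[0]` loop
def guessLoopA : List String → List String → Option String
  | [], _ => none
  | p :: ps, s =>
    let result := s.filter (fun x => PySem.Str.startswith x p)
    if result.length > 0 then result.head? else guessLoopA ps s

def guess_primary_id (identifiers : Option (List String)) (identifier_prefixes : List String) : Option String :=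
  match identifiers with
  | none => none
  | some ids =>
    let s := PySem.List.sorted ids (fun x => x) false   -- identifiers.sort()
    guessLoopA identifier_prefixes s

-- ===== PORT B =====
-- inner `for i, p in enumerate(identifier_prefixes): if x.startswith(p): ...; break`:
-- the index of the first prefix x starts with
def prioB : List String → String → Option Nat
  | [], _ => none
  | p :: ps, x =>
    match PySem.Str.startswith x p with   -- `if x.startswith(p)`
    | true => some 0
    | false => (prioB ps x).map (· + 1)

-- one step of the scan: `if best is None or i < best[0]: best = (i, x)`
def bestStepB (identifier_prefixes : List String) (acc : Option (Nat × String)) (x : String) : Option (Nat × String) :=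
  match prioB identifier_prefixes x with
  | none => acc
  | some i =>
    match acc with
    | none => some (i, x)
    | some (bk, bx) => if i < bk then some (i, x) else some (bk, bx)

def guess_primary_id_alt (identifiers : Option (List String)) (identifier_prefixes : List String) : Option String :=
  match identifiers with
  | none => none
  | some ids =>
    let s := PySem.List.sorted ids (fun x => x) false   -- identifiers.sort()
    (s.foldl (bestStepB identifier_prefixes) none).map Prod.snd

-- ===== PRECONDITION & SPEC =====
def Spec_guess_primary_id (identifiers : Option (List String)) (identifier_prefixes : List String) (out : Option String) : Prop := out = guess_primary_id_alt identifiers identifier_prefixes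
instance (identifiers : Option (List String)) (identifier_prefixes : List String) (out : Option String) : Decidable (Spec_guess_primary_id identifiers identifier_prefixes out) := by unfold Spec_guess_primary_id; infer_instance

-- ===== CLAIM (what is proved, stated in full; the proofs are below) =====
def Claim_equal_guess_primary_id : Prop := ∀ (identifiers : Option (List String)) (identifier_prefixes : List String), Dom_guess_primary_id identifiers identifier_prefixes → Spec_guess_primary_id identifiers identifier_prefixes (guess_primary_id identifiers identifier_prefixes)

-- ===== LEMMAS AND PROOFS =====

-- with no prefixes every step keeps the accumulator
lemma foldl_bestStepB_nil (s : List String) (acc : Option (Nat × String)) :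
    s.foldl (bestStepB []) acc = acc := by
  induction s generalizing acc with
  | nil => rfl
  | cons y t ih => simpa [bestStepB, prioB] using ih acc

-- a best of priority 0 is never replaced
lemma foldl_bestStepB_zero (ps : List String) (s : List String) (x : String) :
    s.foldl (bestStepB ps) (some (0, x)) = some (0, x) := by
  induction s with
  | nil => rfl
  | cons y t ih =>
    simp only [List.foldl_cons, bestStepB]
    cases prioB ps y with
    | none => exact ih
    | some i => simpa using ih

-- if some element of s starts with p, the scan (started from none or a positive-priority best)
-- ends at (0, m) where m is the first such element
lemma foldl_bestStepB_found (p : String) (ps : List String) (s : List String) (m : String)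
    (acc : Option (Nat × String))
    (hacc : acc = none ∨ ∃ bk bx, acc = some (bk, bx) ∧ 0 < bk)
    (hfind : s.find? (fun x => PySem.Str.startswith x p) = some m) :
    s.foldl (bestStepB (p :: ps)) acc = some (0, m) := by
  induction s generalizing acc with
  | nil => simp at hfind
  | cons y t ih =>
    rw [List.find?_cons] at hfind
    cases hy : PySem.Str.startswith y p with
    | true =>
      rw [hy] at hfind
      simp only [Option.some.injEq] at hfind
      subst hfind
      have hstep : bestStepB (p :: ps) acc y = some (0, y) := by
        rcases hacc with h | ⟨bk, bx, h, hbk⟩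
        · subst h; simp only [bestStepB, prioB, hy]
        · subst h; simp only [bestStepB, prioB, hy, if_pos hbk]
      simp only [List.foldl_cons, hstep]
      exact foldl_bestStepB_zero _ _ _
    | false =>
      rw [hy] at hfind
      have hstep : bestStepB (p :: ps) acc y = acc ∨
          ∃ k, bestStepB (p :: ps) acc y = some (k, y) ∧ 0 < k := by
        simp only [bestStepB, prioB, hy]
        cases hpy : prioB ps y with
        | none => exact Or.inl (by simp)
        | some i =>
          rcases hacc with h | ⟨bk, bx, h, hbk⟩ <;> subst h
          · exact Or.inr ⟨i + 1, by simp, Nat.succ_pos i⟩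
          · by_cases hlt : i + 1 < bk
            · exact Or.inr ⟨i + 1, by simp [hlt], Nat.succ_pos i⟩
            · exact Or.inl (by simp [hlt])
      simp only [List.foldl_cons]
      rcases hstep with h | ⟨k, h, hk⟩
      · rw [h]; exact ih acc hacc hfind
      · rw [h]; exact ih _ (Or.inr ⟨k, y, rfl, hk⟩) hfind

def prioShift : Option (Nat × String) → Option (Nat × String) :=
  Option.map (fun q => (q.1 + 1, q.2))

-- if no element of s starts with p, the scan with p prepended is the scan without p, shifted
lemma foldl_bestStepB_shift (p : String) (ps : List String) (s : List String)
    (acc : Option (Nat × String))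
    (hnone : ∀ x ∈ s, PySem.Str.startswith x p = false) :
    s.foldl (bestStepB (p :: ps)) (prioShift acc) = prioShift (s.foldl (bestStepB ps) acc) := by
  induction s generalizing acc with
  | nil => rfl
  | cons y t ih =>
    have hy : PySem.Str.startswith y p = false := hnone y (by simp)
    have hrest : ∀ x ∈ t, PySem.Str.startswith x p = false := fun x hx => hnone x (by simp [hx])
    simp only [List.foldl_cons]
    have hstep : bestStepB (p :: ps) (prioShift acc) y = prioShift (bestStepB ps acc y) := by
      simp only [bestStepB, prioB, hy]
      cases hpy : prioB ps y with
      | none => cases acc <;> rfl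
      | some i =>
        cases acc with
        | none => rfl
        | some b =>
          obtain ⟨bk, bx⟩ := b
          by_cases hlt : i < bk
          · simp [prioShift, hlt, Nat.add_lt_add_right hlt 1]
          · have h2 : ¬ i + 1 < bk + 1 := by omega
            simp [prioShift, hlt, h2]
    rw [hstep]; exact ih _ hrest

-- the main loop equivalence: A's per-prefix filtering equals B's single scan, for ANY list s
lemma loop_eq (ps : List String) (s : List String) :
    guessLoopA ps s = (s.foldl (bestStepB ps) none).map Prod.snd := by
  induction ps generalizing s with
  | nil => simp [guessLoopA, foldl_bestStepB_nil]
  | cons p ps ih =>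
    cases hfind : s.find? (fun x => PySem.Str.startswith x p) with
    | some m =>
      have hfold := foldl_bestStepB_found p ps s m none (Or.inl rfl) hfind
      have hne : s.filter (fun x => PySem.Str.startswith x p) ≠ [] := by
        intro h
        have := List.head?_filter (p := fun x => PySem.Str.startswith x p) (l := s)
        rw [h, hfind] at this; simp at this
      simp only [guessLoopA, hfold]
      rw [if_pos (by simpa [List.length_pos_iff] using hne)]
      rw [List.head?_filter, hfind]
      rfl
    | none =>
      have hnone : ∀ x ∈ s, PySem.Str.startswith x p = false := by
        intro x hx
        have h := List.find?_eq_none.mp hfind x hx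
        exact Bool.not_eq_true _ ▸ (by simpa using h)
      have hempty : s.filter (fun x => PySem.Str.startswith x p) = [] :=
        List.filter_eq_nil_iff.mpr (by intro x hx h; rw [hnone x hx] at h; exact absurd h (by simp))
      have hshift := foldl_bestStepB_shift p ps s none hnone
      simp only [prioShift, Option.map_none] at hshift
      simp only [guessLoopA, hempty, List.length_nil, gt_iff_lt, if_false, lt_self_iff_false]
      rw [ih s, hshift]
      cases s.foldl (bestStepB ps) none <;> rfl

-- ===== VERDICT (by name: the statement is the Claim_ definition above) =====
theorem guess_primary_id_spec : Claim_equal_guess_primary_id := by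
  intro identifiers identifier_prefixes _
  unfold Spec_guess_primary_id guess_primary_id guess_primary_id_alt
  cases identifiers with
  | none => rfl
  | some ids => exact loop_eq identifier_prefixes _
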